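-- pv_equiv track=rewrite | github.com/vl4kz/cs4710 | hw3/hw3_vl4kz_mzw7af.py | str_dir
-- ===== SOURCE A (Python) =====
-- def str_dir(r_dir, c_dir):
--     dirs = ["NW", "N ", "NE", "W ", ". ", "E ", "SW", "S ", "SE"]
--     count = 0
--     for r in [-1, 0, 1]:
--         for c in [-1, 0, 1]:
--             if r_dir == r and c_dir == c:
--                 return dirs[count]
--             count += 1
-- ===== SOURCE B (Python) =====
-- def str_dir(r_dir, c_dir):
--     if r_dir in (-1, 0, 1) and c_dir in (-1, 0, 1):
--         ns = "N" if r_dir == -1 else ("S" if r_dir == 1 else "")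
--         ew = "W" if c_dir == -1 else ("E" if c_dir == 1 else "")
--         s = (ns + ew) or "."
--         return s + " " * (2 - len(s))
--     return None
-- ===== Notes on version B (the rewrite author's own statement) =====
-- stated objective: alternative
-- what changed: Instead of scanning a 9-entry list with a running counter (or any lookup table), B constructs the compass string compositionally from its two axes: an N/S letter from r_dir and an E/W letter from c_dir, concatenated and padded to width 2 (with '. ' for the origin), returning None outside the 3x3 offset range.
import Mathlib
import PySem

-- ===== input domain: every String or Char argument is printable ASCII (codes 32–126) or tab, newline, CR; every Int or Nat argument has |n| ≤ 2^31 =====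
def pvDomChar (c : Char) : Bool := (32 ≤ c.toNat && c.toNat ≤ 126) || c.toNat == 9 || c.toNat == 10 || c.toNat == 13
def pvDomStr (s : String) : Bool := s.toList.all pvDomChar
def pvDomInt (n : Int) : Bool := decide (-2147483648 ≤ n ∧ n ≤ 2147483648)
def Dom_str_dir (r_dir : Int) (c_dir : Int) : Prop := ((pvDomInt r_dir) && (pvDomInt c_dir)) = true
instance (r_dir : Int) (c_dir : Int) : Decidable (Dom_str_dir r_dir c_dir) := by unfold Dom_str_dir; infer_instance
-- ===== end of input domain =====

-- B builds the compass string compositionally from its N/S and E/W components instead of scanning a 9-entry list (alternative decomposition).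

-- ===== PORT A =====
-- inner 'for c in [-1, 0, 1]' loop: Sum.inl = loop fell through with updated count, Sum.inr = function returned
def strDirInner (r_dir c_dir r : Int) (dirs : List String) (count : Nat) : List Int → Sum Nat (Option String)
  | [] => Sum.inl count
  | c :: rest =>
      if r_dir = r ∧ c_dir = c then Sum.inr (PySem.List.pyGet? dirs count)
      else strDirInner r_dir c_dir r dirs (count + 1) rest

-- outer 'for r in [-1, 0, 1]' loop
def strDirOuter (r_dir c_dir : Int) (dirs : List String) (count : Nat) : List Int → Option String
  | [] => none
  | r :: rest =>
      match strDirInner r_dir c_dir r dirs count [-1, 0, 1] with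
      | Sum.inr out => out
      | Sum.inl count' => strDirOuter r_dir c_dir dirs count' rest

def str_dir (r_dir : Int) (c_dir : Int) : Option String :=
  strDirOuter r_dir c_dir ["NW", "N ", "NE", "W ", ". ", "E ", "SW", "S ", "SE"] 0 [-1, 0, 1]

-- ===== PORT B =====
-- ports s + " " * (2 - len(s)) by hand over List Char (exact: ASCII, lengths 1 or 2)
def strDirPad (s : List Char) : List Char :=
  s ++ List.replicate (2 - s.length) ' '

def str_dir_alt (r_dir : Int) (c_dir : Int) : Option String :=
  if (r_dir = -1 ∨ r_dir = 0 ∨ r_dir = 1) ∧ (c_dir = -1 ∨ c_dir = 0 ∨ c_dir = 1) then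
    let ns : List Char := if r_dir = -1 then ['N'] else if r_dir = 1 then ['S'] else []
    let ew : List Char := if c_dir = -1 then ['W'] else if c_dir = 1 then ['E'] else []
    -- '(ns + ew) or "."' : empty string is falsy
    let s : List Char := if ns ++ ew = [] then ['.'] else ns ++ ew
    some (String.mk (strDirPad s))
  else
    none

-- ===== PRECONDITION & SPEC =====
def Spec_str_dir (r_dir : Int) (c_dir : Int) (out : Option String) : Prop := out = str_dir_alt r_dir c_dir
instance (r_dir : Int) (c_dir : Int) (out : Option String) : Decidable (Spec_str_dir r_dir c_dir out) := by unfold Spec_str_dir; infer_instance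

-- ===== CLAIM (what is proved, stated in full; the proofs are below) =====
def Claim_equal_str_dir : Prop := ∀ (r_dir : Int) (c_dir : Int), Dom_str_dir r_dir c_dir → Spec_str_dir r_dir c_dir (str_dir r_dir c_dir)

-- ===== LEMMAS AND PROOFS =====
lemma strDirInner_skip (r c rv : Int) (dirs : List String) (cs : List Int)
    (h : ∀ x ∈ cs, ¬(r = rv ∧ c = x)) :
    ∀ count, strDirInner r c rv dirs count cs = Sum.inl (count + cs.length) := by
  induction cs with
  | nil => intro count; simp [strDirInner]
  | cons a t ih =>
      intro count
      simp only [strDirInner]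
      rw [if_neg (h a (by simp))]
      rw [ih (fun x hx => h x (by simp [hx]))]
      congr 1
      simp [List.length_cons]
      omega

lemma str_dir_none (r c : Int)
    (h : ¬((r = -1 ∨ r = 0 ∨ r = 1) ∧ (c = -1 ∨ c = 0 ∨ c = 1))) :
    str_dir r c = none := by
  have hm : ∀ rv : Int, (rv = -1 ∨ rv = 0 ∨ rv = 1) → ∀ count,
      strDirInner r c rv ["NW", "N ", "NE", "W ", ". ", "E ", "SW", "S ", "SE"] count [-1, 0, 1]
        = Sum.inl (count + 3) := by
    intro rv hrv count
    rw [strDirInner_skip r c rv _ _ (by intro x hx; simp at hx; omega)]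
    rfl
  simp only [str_dir, strDirOuter, hm (-1) (by omega), hm 0 (by omega), hm 1 (by omega)]

-- ===== VERDICT (by name: the statement is the Claim_ definition above) =====
theorem str_dir_spec : Claim_equal_str_dir := by
  intro r c _
  unfold Spec_str_dir
  by_cases h : (r = -1 ∨ r = 0 ∨ r = 1) ∧ (c = -1 ∨ c = 0 ∨ c = 1)
  · obtain ⟨hr | hr | hr, hc | hc | hc⟩ := h <;> subst hr <;> subst hc <;> decide
  · rw [str_dir_none r c h, str_dir_alt, if_neg h]
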